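/- GENERATED by farm/mkstatement.py from design/units.tsv (unit `prog_main.COMPOSITION`) and the Specs of Gif/Spec/*.lean — do not edit.
   THE STATEMENT of the proof unit `prog_main.COMPOSITION`: the function `prog_main` (37 instructions) satisfies its contract,
   GIVEN THE STATEMENTS OF ITS 3 SEGMENTS (`Gif.Spec.prog_main.Seg<k> Lay μ u₀`: what the unit `prog_main.<k>` proves).
   No machine code is walked: `ReachVia.trans` along the segments (the exit assertion of a segment is the entry assertion of
   its successor), an induction on the loop measures. What the names mean: ProgX/Base/Spec/Basic.lean. The theorem to prove:
   `theorem prog_main_COMPOSITION_ok : Gif.Spec.prog_main_COMPOSITION.Statement`. -/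
import Gif.Code
import Gif.Dec.All
import Gif.Labels
import Gif.Spec.Driver
import Gif.Spec.Seg_prog_main
namespace Gif.Spec.prog_main_COMPOSITION
open X86 X86.User Asan

/-- The statement of unit `prog_main.COMPOSITION`. -/
def Statement : Prop :=
  ∀ (Lay : Layout) (_hLay : Lay.hi = 0x1000000) (μ : Microarch) (_hμ : UserX.MicroOK μ) (u₀ : State)
    (_h_prog_main_P : Gif.Spec.prog_main.SegP Lay μ u₀)
    (_h_prog_main_1 : Gif.Spec.prog_main.Seg1 Lay μ u₀)
    (_h_prog_main_E : Gif.Spec.prog_main.SegE Lay μ u₀),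
    ∀ (H : Heap) (rest : List Obj) (frames : List (Nat × FrameLayout)), Calls Lay μ ProgX.Base.WayInv (ProgX.Base.conv u₀) Gif.L.prog_main.entry (Gif.Spec.prog_main.spec H rest frames)

end Gif.Spec.prog_main_COMPOSITION
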